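-- pv_equiv track=rewrite | github.com/fael0306/Algoritmos-e-Estruturas-de-Dados | II/P2 - Questão de recursão.py | encontrar_maior_numero_divisao_conquista
-- ===== SOURCE A (Python) =====
-- def encontrar_maior_numero_divisao_conquista(lista_circular, inicio, fim):
--     # Caso base: se há apenas um elemento, retorna esse elemento
--     if inicio == fim:
--         return lista_circular[inicio]
--
--     # Caso base: se há apenas dois elementos, retorna o maior
--     if inicio + 1 == fim:
--         return max(lista_circular[inicio], lista_circular[fim])
--
--     # Calcula o índice do meio
--     meio = (inicio + fim) // 2
--
--     # Encontra o máximo em cada metade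
--     max_esquerda = encontrar_maior_numero_divisao_conquista(lista_circular, inicio, meio)
--     max_direita = encontrar_maior_numero_divisao_conquista(lista_circular, meio + 1, fim)
--
--     # Retorna o máximo entre os máximos encontrados
--     return max(max_esquerda, max_direita)
-- ===== SOURCE B (Python) =====
-- def encontrar_maior_numero_divisao_conquista(lista_circular, inicio, fim):
--     maior = lista_circular[inicio]
--     for i in range(inicio + 1, fim + 1):
--         maior = max(maior, lista_circular[i])
--     return maior
-- ===== Notes on version B (the rewrite author's own statement) =====
-- stated objective: simpler
-- what changed: Replaced the divide-and-conquer recursion (split at the midpoint, recombine with max) by a single left-to-right scan keeping a running maximum.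
import Mathlib
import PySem

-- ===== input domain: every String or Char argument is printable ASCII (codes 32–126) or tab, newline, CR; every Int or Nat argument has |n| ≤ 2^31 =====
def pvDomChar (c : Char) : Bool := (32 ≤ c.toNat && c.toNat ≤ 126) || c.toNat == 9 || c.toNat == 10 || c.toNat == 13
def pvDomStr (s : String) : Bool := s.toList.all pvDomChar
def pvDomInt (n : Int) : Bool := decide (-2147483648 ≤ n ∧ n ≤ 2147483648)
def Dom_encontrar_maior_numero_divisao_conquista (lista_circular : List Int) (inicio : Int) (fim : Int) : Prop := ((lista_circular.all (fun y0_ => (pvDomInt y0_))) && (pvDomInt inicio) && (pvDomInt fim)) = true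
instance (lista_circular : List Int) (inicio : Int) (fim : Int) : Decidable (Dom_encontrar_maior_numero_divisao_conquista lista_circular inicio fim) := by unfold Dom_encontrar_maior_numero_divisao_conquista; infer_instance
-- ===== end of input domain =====

-- B replaces the divide-and-conquer recursion by a single left-to-right scan keeping a running maximum (simpler; no recursion depth).

-- ===== PORT A =====
-- lista_circular[i] with Python's negative-index rule; default 0 is only reached outside Pre_
def pvGet (lista_circular : List Int) (i : Int) : Int :=
  (PySem.List.pyGet? lista_circular i).getD 0

-- A's recursion, driven by a fuel counter that is ample whenever inicio ≤ fim
-- (Python diverges when inicio > fim and the range is not a base case; those inputs are outside Pre_).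
def pvGoA (lista_circular : List Int) : Nat → Int → Int → Int
  | 0, inicio, _ => pvGet lista_circular inicio
  | fuel + 1, inicio, fim =>
    if inicio = fim then pvGet lista_circular inicio
    else if inicio + 1 = fim then
      max (pvGet lista_circular inicio) (pvGet lista_circular fim)
    else
      let meio := PySem.Int.floordiv (inicio + fim) 2
      let max_esquerda := pvGoA lista_circular fuel inicio meio
      let max_direita := pvGoA lista_circular fuel (meio + 1) fim
      max max_esquerda max_direita

def encontrar_maior_numero_divisao_conquista (lista_circular : List Int) (inicio : Int) (fim : Int) : Int :=
  pvGoA lista_circular ((fim - inicio).toNat + 1) inicio fim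

-- ===== PORT B =====
def encontrar_maior_numero_divisao_conquista_alt (lista_circular : List Int) (inicio : Int) (fim : Int) : Int :=
  (PySem.List.pyRange (inicio + 1) (fim + 1) 1).foldl
    (fun maior i => max maior (pvGet lista_circular i)) (pvGet lista_circular inicio)

-- ===== PRECONDITION & SPEC =====
-- Pre_ excludes inicio > fim (A recurses forever there) and indices outside Python's
-- accepted range [-len, len) (A raises IndexError there).
def Pre_encontrar_maior_numero_divisao_conquista (lista_circular : List Int) (inicio : Int) (fim : Int) : Prop :=
  inicio ≤ fim ∧ -(lista_circular.length : Int) ≤ inicio ∧ fim < (lista_circular.length : Int)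
instance (lista_circular : List Int) (inicio : Int) (fim : Int) : Decidable (Pre_encontrar_maior_numero_divisao_conquista lista_circular inicio fim) := by unfold Pre_encontrar_maior_numero_divisao_conquista; infer_instance

def pvWitness_encontrar_maior_numero_divisao_conquista : List Int × Int × Int := ([3, 1, 4, 1, 5], 0, 4)

def Spec_encontrar_maior_numero_divisao_conquista (lista_circular : List Int) (inicio : Int) (fim : Int) (out : Int) : Prop := out = encontrar_maior_numero_divisao_conquista_alt lista_circular inicio fim
instance (lista_circular : List Int) (inicio : Int) (fim : Int) (out : Int) : Decidable (Spec_encontrar_maior_numero_divisao_conquista lista_circular inicio fim out) := by unfold Spec_encontrar_maior_numero_divisao_conquista; infer_instance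

-- ===== CLAIM (what is proved, stated in full; the proofs are below) =====
def Claim_equal_encontrar_maior_numero_divisao_conquista : Prop := ∀ (lista_circular : List Int) (inicio : Int) (fim : Int), Dom_encontrar_maior_numero_divisao_conquista lista_circular inicio fim → Pre_encontrar_maior_numero_divisao_conquista lista_circular inicio fim → Spec_encontrar_maior_numero_divisao_conquista lista_circular inicio fim (encontrar_maior_numero_divisao_conquista lista_circular inicio fim)

-- ===== LEMMAS AND PROOFS =====

-- reference maximum of lista_circular[i..i+n] as a right-leaning max tree
def pvMx (lista_circular : List Int) : Nat → Int → Int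
  | 0, i => pvGet lista_circular i
  | n + 1, i => max (pvGet lista_circular i) (pvMx lista_circular n (i + 1))

theorem pvMx_split (l : List Int) (n m : Nat) (i : Int) :
    pvMx l (n + m + 1) i = max (pvMx l n i) (pvMx l m (i + (n : Int) + 1)) := by
  induction n generalizing i with
  | zero => simp [pvMx]
  | succ n ih =>
    have : n + 1 + m + 1 = (n + m + 1) + 1 := by omega
    rw [this]
    show max (pvGet l i) (pvMx l (n + m + 1) (i + 1)) = _
    rw [ih (i + 1)]
    have hc : i + 1 + (n : Int) + 1 = i + ((n + 1 : Nat) : Int) + 1 := by push_cast; ring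
    rw [hc, ← max_assoc]
    rfl

theorem pvGoA_eq_pvMx (l : List Int) (fuel : Nat) (i f : Int)
    (hle : i ≤ f) (hfuel : (f - i).toNat < fuel) :
    pvGoA l fuel i f = pvMx l (f - i).toNat i := by
  induction fuel generalizing i f with
  | zero => omega
  | succ fuel ih =>
    by_cases h1 : i = f
    · subst h1
      simp [pvGoA, pvMx]
    · by_cases h2 : i + 1 = f
      · subst h2
        have hn : (i + 1 - i).toNat = 1 := by omega
        rw [hn]
        show (if i = i + 1 then _ else if i + 1 = i + 1 then _ else _) = _
        rw [if_neg h1, if_pos rfl]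
        rfl
      · have h2f : i + 2 ≤ f := by omega
        have hm : PySem.Int.floordiv (i + f) 2 = (i + f) / 2 :=
          PySem.Int.floordiv_eq_ediv_of_pos (by norm_num)
        have hb1 : i ≤ PySem.Int.floordiv (i + f) 2 := by rw [hm]; omega
        have hb2 : PySem.Int.floordiv (i + f) 2 + 1 ≤ f := by rw [hm]; omega
        have e1 : pvGoA l fuel i (PySem.Int.floordiv (i + f) 2)
            = pvMx l (PySem.Int.floordiv (i + f) 2 - i).toNat i :=
          ih i _ hb1 (by rw [hm]; omega)
        have e2 : pvGoA l fuel (PySem.Int.floordiv (i + f) 2 + 1) f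
            = pvMx l (f - (PySem.Int.floordiv (i + f) 2 + 1)).toNat (PySem.Int.floordiv (i + f) 2 + 1) :=
          ih _ f (by omega) (by rw [hm]; omega)
        simp only [pvGoA, if_neg h1, if_neg h2]
        rw [e1, e2]
        have hsum : (f - i).toNat
            = (PySem.Int.floordiv (i + f) 2 - i).toNat + (f - (PySem.Int.floordiv (i + f) 2 + 1)).toNat + 1 := by
          rw [hm] at *; omega
        rw [hsum, pvMx_split]
        have harg : i + (((PySem.Int.floordiv (i + f) 2 - i).toNat : Nat) : Int) + 1
            = PySem.Int.floordiv (i + f) 2 + 1 := by rw [hm] at *; omega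
        rw [harg]

theorem pvFold_max (l : List Int) (xs : List Int) (x y : Int) :
    xs.foldl (fun m i => max m (pvGet l i)) (max x y)
      = max x (xs.foldl (fun m i => max m (pvGet l i)) y) := by
  induction xs generalizing y with
  | nil => simp
  | cons a xs ih => simp [List.foldl, max_assoc, ih]

theorem pvAlt_eq_pvMx (l : List Int) (n : Nat) (i : Int) :
    (PySem.List.pyRange (i + 1) (i + 1 + (n : Int)) 1).foldl
      (fun m j => max m (pvGet l j)) (pvGet l i) = pvMx l n i := by
  induction n generalizing i with
  | zero => simp [PySem.List.pyRange_one_eq_nil, pvMx]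
  | succ n ih =>
    have hlt : i + 1 < i + 1 + ((n + 1 : Nat) : Int) := by push_cast; omega
    rw [PySem.List.pyRange_one_cons hlt]
    have harg : i + 1 + ((n + 1 : Nat) : Int) = (i + 1) + 1 + (n : Int) := by push_cast; ring
    rw [harg]
    show ((PySem.List.pyRange (i + 1 + 1) (i + 1 + 1 + (n : Int)) 1).foldl
      (fun m j => max m (pvGet l j)) (max (pvGet l i) (pvGet l (i + 1)))) = _
    rw [pvFold_max, ih (i + 1)]
    simp [pvMx]

-- ===== VERDICT (by name: the statement is the Claim_ definition above) =====
theorem encontrar_maior_numero_divisao_conquista_spec : Claim_equal_encontrar_maior_numero_divisao_conquista := by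
  intro l i f _ hpre
  obtain ⟨hle, -, -⟩ := hpre
  unfold Spec_encontrar_maior_numero_divisao_conquista
  unfold encontrar_maior_numero_divisao_conquista encontrar_maior_numero_divisao_conquista_alt
  rw [pvGoA_eq_pvMx l _ i f hle (by omega)]
  have : f + 1 = i + 1 + (((f - i).toNat : Nat) : Int) := by omega
  rw [this, pvAlt_eq_pvMx]
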